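-- pv_equiv track=rewrite | github.com/chenchuangc/money_algorithm | chen/01.array/36_at_least_dubble_others.py | max_is_dubble
-- ===== SOURCE A (Python) =====
-- def max_is_dubble(arr):
--     n = len(arr)
--     max_num_index = -1
--     max_num = 0
--     sec_num = 0
--     for i in range(1, n):
--         if sec_num < arr[i] < max_num:
--             sec_num = arr[i]
--         elif arr[i] > max_num:
--             sec_num = max_num
--             max_num = arr[i]
--             max_num_index = i
--
--     if max_num // sec_num >= 2:
--         return max_num_index
--     else:
--         return -1
-- ===== SOURCE B (Python) =====
-- def max_is_dubble(arr):
--     # two separate passes over arr[1:] instead of one coupled online scan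
--     tail = arr[1:]
--     max_num = max((x for x in tail if x > 0), default=0)
--     if max_num > 0:
--         max_num_index = 1 + tail.index(max_num)
--     else:
--         max_num_index = -1
--     sec_num = max((x for x in tail if 0 < x < max_num), default=0)
--     return max_num_index if max_num // sec_num >= 2 else -1
-- ===== Notes on version B (the rewrite author's own statement) =====
-- stated objective: alternative
-- what changed: A's single online scan that updates index, max and second-max together is replaced by two independent passes over arr[1:]: one taking the positive maximum with its first index, one taking the maximum of the values strictly below it.
import Mathlib
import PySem

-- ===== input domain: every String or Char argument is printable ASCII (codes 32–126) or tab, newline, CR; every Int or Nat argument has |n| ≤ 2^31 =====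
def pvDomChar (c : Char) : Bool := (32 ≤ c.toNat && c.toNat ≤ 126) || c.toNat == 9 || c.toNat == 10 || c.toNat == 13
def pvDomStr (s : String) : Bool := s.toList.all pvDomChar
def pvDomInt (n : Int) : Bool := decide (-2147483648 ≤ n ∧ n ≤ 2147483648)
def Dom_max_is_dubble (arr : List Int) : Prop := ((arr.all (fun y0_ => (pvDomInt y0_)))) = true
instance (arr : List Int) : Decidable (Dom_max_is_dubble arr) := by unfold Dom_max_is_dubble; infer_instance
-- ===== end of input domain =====

-- B replaces A's single coupled online scan (index / max / second-max updated together) by two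
-- independent passes over arr[1:]: max with its first index, then the second max; objective: alternative.

-- ===== PORT A =====
-- one loop step of A: state is (max_num_index, max_num, sec_num), i the loop index, x = arr[i]
def pvStepA (st : Int × Int × Int) (i : Int) (x : Int) : Int × Int × Int :=
  if st.2.2 < x ∧ x < st.2.1 then (st.1, st.2.1, x)
  else if x > st.2.1 then (i, x, st.2.1)
  else st

def max_is_dubble (arr : List Int) : Int :=
  let n : Int := arr.length
  let st := (PySem.List.pyRange 1 n).foldl
      (fun st i => pvStepA st i (PySem.List.pyGetD arr i 0)) (-1, 0, 0)
  if PySem.Int.floordiv st.2.1 st.2.2 ≥ 2 then st.1 else -1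

-- ===== PORT B =====
def max_is_dubble_alt (arr : List Int) : Int :=
  let tail := PySem.List.slice arr (some 1) none
  let maxNum := PySem.List.maxD (tail.filter (fun x => decide (0 < x))) id 0
  let maxIdx : Int :=
    if 0 < maxNum then 1 + (((PySem.List.index? tail maxNum).getD 0 : Nat) : Int) else -1
  let secNum := PySem.List.maxD (tail.filter (fun x => decide (0 < x ∧ x < maxNum))) id 0
  if PySem.Int.floordiv maxNum secNum ≥ 2 then maxIdx else -1

-- ===== PRECONDITION & SPEC =====
-- Pre_ excludes exactly the inputs on which A's sec_num stays 0 (empty or singleton arr, or a tail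
-- without two distinct positive values), where A raises ZeroDivisionError on max_num // sec_num.
def Pre_max_is_dubble (arr : List Int) : Prop :=
  ∃ x ∈ arr.tail, 0 < x ∧ ∃ y ∈ arr.tail, x < y
instance (arr : List Int) : Decidable (Pre_max_is_dubble arr) := by
  unfold Pre_max_is_dubble; infer_instance

def pvWitness_max_is_dubble : List Int := [0, 1, 2]

def Spec_max_is_dubble (arr : List Int) (out : Int) : Prop := out = max_is_dubble_alt arr
instance (arr : List Int) (out : Int) : Decidable (Spec_max_is_dubble arr out) := by
  unfold Spec_max_is_dubble; infer_instance

-- ===== CLAIM (what is proved, stated in full; the proofs are below) =====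
def Claim_equal_max_is_dubble : Prop := ∀ (arr : List Int), Dom_max_is_dubble arr → Pre_max_is_dubble arr → Spec_max_is_dubble arr (max_is_dubble arr)

-- ===== LEMMAS AND PROOFS =====

-- A's loop as a structural recursion over the suffix, carrying the current index
def pvLoop : List Int → Int → (Int × Int × Int) → (Int × Int × Int)
  | [], _, st => st
  | x :: l, p, st => pvLoop l (p + 1) (pvStepA st p x)

-- the "second max" step, with the final maximum M fixed
def pvG (M a x : Int) : Int := if x < M then max a x else a

lemma pvBridgeA (arr : List Int) (a : Nat) (st : Int × Int × Int) :
    (PySem.List.pyRange (a : Int) (arr.length : Int)).foldl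
      (fun st i => pvStepA st i (PySem.List.pyGetD arr i 0)) st
    = pvLoop (arr.drop a) (a : Int) st := by
  induction hk : arr.length - a generalizing a st with
  | zero =>
    have hle : arr.length ≤ a := by omega
    rw [PySem.List.pyRange_one_eq_nil (by exact_mod_cast hle), List.drop_eq_nil_of_le hle]
    simp [pvLoop]
  | succ n ih =>
    have hlt : a < arr.length := by omega
    rw [PySem.List.pyRange_one_cons (by exact_mod_cast hlt), List.drop_eq_getElem_cons hlt]
    simp only [List.foldl_cons, pvLoop]
    have hget : PySem.List.pyGetD arr (a : Int) 0 = arr[a] := by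
      simp [PySem.List.pyGetD_natCast, List.getElem?_eq_getElem hlt]
    rw [hget]
    have : ((a : Int) + 1) = (((a + 1 : Nat)) : Int) := by push_cast; ring
    rw [this, ih (a + 1) _ (by omega)]

lemma pvLoop_max (l : List Int) (p idx m s : Int) :
    (pvLoop l p (idx, m, s)).2.1 = l.foldl max m := by
  induction l generalizing p idx m s with
  | nil => rfl
  | cons x l ih =>
    simp only [pvLoop, pvStepA, List.foldl_cons]
    split_ifs with h1 h2
    · rw [ih]; congr 1; omega
    · rw [ih]; congr 1; omega
    · rw [ih]; congr 1; omega

lemma pvLoop_idx (l : List Int) (p idx m s : Int) :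
    (pvLoop l p (idx, m, s)).1 =
      if m < l.foldl max m then p + (l.idxOf (l.foldl max m) : Int) else idx := by
  induction l generalizing p idx m s with
  | nil => simp [pvLoop]
  | cons x l ih =>
    have hle : ∀ (m' : Int), m' ≤ l.foldl max m' := fun m' => (PySem.List.le_foldl_max l m').1
    simp only [pvLoop, pvStepA, List.foldl_cons]
    by_cases h1 : s < x ∧ x < m
    · rw [if_pos h1, ih]
      have hmx : max m x = m := by omega
      rw [hmx]
      by_cases hM : m < l.foldl max m
      · have hxM : x ≠ l.foldl max m := by have := hle m; omega
        rw [if_pos hM, if_pos hM, List.idxOf_cons_ne _ hxM]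
        push_cast; ring
      · rw [if_neg hM, if_neg hM]
    · rw [if_neg h1]
      by_cases h2 : x > m
      · rw [if_pos h2, ih]
        have hmx : max m x = x := by omega
        rw [hmx]
        have hMx : x ≤ l.foldl max x := hle x
        by_cases hM : x < l.foldl max x
        · rw [if_pos hM, if_pos (show m < l.foldl max x by omega),
              List.idxOf_cons_ne _ (show x ≠ l.foldl max x by omega)]
          push_cast; ring
        · have hxM : l.foldl max x = x := by omega
          rw [if_neg hM, if_pos (show m < l.foldl max x by omega), hxM, List.idxOf_cons_self]
          simp
      · rw [if_neg h2, ih]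
        have hmx : max m x = m := by omega
        rw [hmx]
        by_cases hM : m < l.foldl max m
        · have hxM : x ≠ l.foldl max m := by have := hle m; omega
          rw [if_pos hM, if_pos hM, List.idxOf_cons_ne _ hxM]
          push_cast; ring
        · rw [if_neg hM, if_neg hM]

lemma pvLoop_sec (l : List Int) (p idx m s : Int) (h : s ≤ m) :
    (pvLoop l p (idx, m, s)).2.2 =
      l.foldl (pvG (l.foldl max m)) (pvG (l.foldl max m) s m) := by
  induction l generalizing p idx m s with
  | nil => simp [pvLoop, pvG]
  | cons x l ih =>
    have hle : ∀ (m' : Int), m' ≤ l.foldl max m' := fun m' => (PySem.List.le_foldl_max l m').1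
    simp only [pvLoop, pvStepA, List.foldl_cons]
    by_cases h1 : s < x ∧ x < m
    · rw [if_pos h1, ih _ _ _ _ (by omega)]
      have hmx : max m x = m := by omega
      rw [hmx]
      congr 1
      simp only [pvG]
      have := hle m
      split_ifs <;> omega
    · rw [if_neg h1]
      by_cases h2 : x > m
      · rw [if_pos h2, ih _ _ _ _ (by omega)]
        have hmx : max m x = x := by omega
        rw [hmx]
        congr 1
        simp only [pvG]
        have := hle x
        split_ifs <;> omega
      · rw [if_neg h2, ih _ _ _ _ (by omega)]
        have hmx : max m x = m := by omega
        rw [hmx]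
        congr 1
        simp only [pvG]
        have := hle m
        split_ifs <;> omega

lemma pvIdxOf?_mem (l : List Int) (v : Int) (h : v ∈ l) : List.idxOf? v l = some (l.idxOf v) := by
  induction l with
  | nil => simp at h
  | cons x l ih =>
    by_cases hx : x = v
    · subst hx
      simp [List.idxOf?_cons, List.idxOf_cons_self]
    · have hv : v ∈ l := by
        rcases List.mem_cons.mp h with h' | h'
        · exact absurd h'.symm hx
        · exact h'
      simp [List.idxOf?_cons, hx, ih hv, beq_iff_eq]

lemma pvMaxD_pos (xs : List Int) (h : ∀ x ∈ xs, 0 < x) :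
    PySem.List.maxD xs id 0 = xs.foldl max 0 := by
  cases xs with
  | nil => rfl
  | cons y ys =>
    have hy : 0 < y := h y (List.mem_cons_self)
    show (PySem.List.max? (y :: ys) (fun z => z)).getD 0 = _
    rw [PySem.List.max?_id_cons y ys]
    simp only [Option.getD, List.foldl_cons]
    rw [max_eq_right (le_of_lt hy)]

lemma pvFold1 (l : List Int) (a : Int) (h : 0 ≤ a) :
    l.foldl (fun acc x => if 0 < x then max acc x else acc) a = l.foldl max a := by
  induction l generalizing a with
  | nil => rfl
  | cons x l ih =>
    simp only [List.foldl_cons]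
    by_cases hx : 0 < x
    · rw [if_pos hx, ih _ (by omega)]
    · rw [if_neg hx, max_eq_left (by omega)]
      exact ih _ h

lemma pvFold2 (M : Int) (l : List Int) (a : Int) (h : 0 ≤ a) :
    l.foldl (fun acc x => if 0 < x ∧ x < M then max acc x else acc) a
      = l.foldl (pvG M) a := by
  induction l generalizing a with
  | nil => rfl
  | cons x l ih =>
    simp only [List.foldl_cons, pvG]
    by_cases hx : 0 < x ∧ x < M
    · rw [if_pos hx, if_pos hx.2, ih _ (by omega)]
    · by_cases hxM : x < M
      · rw [if_neg hx, if_pos hxM, max_eq_left (by omega)]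
        exact ih _ h
      · rw [if_neg hx, if_neg hxM]
        exact ih _ h

lemma pvFoldlMaxMem (l : List Int) (m : Int) :
    l.foldl max m = m ∨ l.foldl max m ∈ l := by
  induction l generalizing m with
  | nil => left; rfl
  | cons x l ih =>
    simp only [List.foldl_cons]
    rcases ih (max m x) with h | h
    · rcases max_choice m x with hc | hc
      · left; rw [h, hc]
      · right; rw [h, hc]; exact List.mem_cons_self
    · right; exact List.mem_cons_of_mem _ h

-- ===== VERDICT (by name: the statement is the Claim_ definition above) =====
theorem max_is_dubble_spec : Claim_equal_max_is_dubble := by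
  intro arr _ _
  unfold Spec_max_is_dubble
  simp only [max_is_dubble, max_is_dubble_alt]
  have hb := pvBridgeA arr 1 (-1, 0, 0)
  simp only [Nat.cast_one, List.drop_one] at hb
  rw [hb, PySem.List.slice_from_one]
  rw [pvLoop_max, pvLoop_sec _ _ _ _ _ (le_refl 0), pvLoop_idx]
  have h00 : pvG (arr.tail.foldl max 0) 0 0 = 0 := by simp [pvG]
  rw [h00]
  -- B's first pass equals A's running maximum
  have hB1 : PySem.List.maxD (arr.tail.filter (fun x => decide (0 < x))) id 0
      = arr.tail.foldl max 0 := by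
    rw [pvMaxD_pos _ (by intro x hx; simpa using (List.mem_filter.mp hx).2),
        List.foldl_filter]
    simp only [decide_eq_true_eq]
    exact pvFold1 _ _ (le_refl 0)
  rw [hB1]
  -- B's second pass equals A's final sec_num
  have hB2 : PySem.List.maxD
        (arr.tail.filter (fun x => decide (0 < x ∧ x < arr.tail.foldl max 0))) id 0
      = arr.tail.foldl (pvG (arr.tail.foldl max 0)) 0 := by
    rw [pvMaxD_pos _ (by intro x hx; exact ((by simpa using (List.mem_filter.mp hx).2 : (0 < x ∧ _))).1),
        List.foldl_filter]
    simp only [decide_eq_true_eq]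
    exact pvFold2 _ _ _ (le_refl 0)
  rw [hB2]
  by_cases hM : (0 : Int) < arr.tail.foldl max 0
  · have hmem : arr.tail.foldl max 0 ∈ arr.tail := by
      rcases pvFoldlMaxMem arr.tail 0 with h | h
      · omega
      · exact h
    simp only [PySem.List.index?, pvIdxOf?_mem _ _ hmem, Option.getD, if_pos hM]
  · simp only [if_neg hM]
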